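-- pv_equiv track=rewrite | github.com/jfblg/Tracktime-UZE | src/models/startlist/startlist_alg.py | get_index_odd_count
-- ===== SOURCE A (Python) =====
-- def get_index_odd_count(length):
--
--     new_index_list = []
--     x = length - 1
--     for index in range(0, length):
--
--         new_index_list.append(x)
--
--         if x == 0:
--             x += 1
--         elif x % 2 == 0:
--             x -= 2
--         else:
--             x += 2
--
--     return new_index_list
-- ===== SOURCE B (Python) =====
-- def get_index_odd_count(length):
--     start = length - 1
--     if start % 2 != 0:
--         return [start + 2 * i for i in range(length)]
--     mid = start // 2
--     return [start - 2 * i if i <= mid else 2 * i - length for i in range(length)]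
-- ===== Notes on version B (the rewrite author's own statement) =====
-- stated objective: simpler
-- what changed: Replaces the stateful loop that threads a running value x through a three-way parity-update branch with a closed-form list built by indexing: element i is computed directly from i (one arithmetic formula per parity of length-1).
import Mathlib
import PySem

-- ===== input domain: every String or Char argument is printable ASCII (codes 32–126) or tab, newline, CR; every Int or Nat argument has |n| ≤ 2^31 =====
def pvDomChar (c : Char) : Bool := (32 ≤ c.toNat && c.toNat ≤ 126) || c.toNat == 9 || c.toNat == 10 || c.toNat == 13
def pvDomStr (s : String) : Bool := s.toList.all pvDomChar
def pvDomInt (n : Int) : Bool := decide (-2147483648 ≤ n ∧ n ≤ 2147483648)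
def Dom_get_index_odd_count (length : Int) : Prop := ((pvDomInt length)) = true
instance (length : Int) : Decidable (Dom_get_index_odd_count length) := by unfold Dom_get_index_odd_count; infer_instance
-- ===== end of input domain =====

-- B replaces A's stateful loop (a running value x updated by a three-way branch)
-- with a direct closed-form indexing: element i is computed from i alone (objective: simpler).

-- ===== PORT A =====
-- literal transliteration of A: fold the parity-update loop over range(0, length)
def get_index_odd_count (length : Int) : List Int :=
  let r := (PySem.List.pyRange 0 length 1).foldl
    (fun (s : List Int × Int) _ =>
      let lst := s.1 ++ [s.2]
      if s.2 == 0 then (lst, s.2 + 1)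
      else if PySem.Int.mod s.2 2 == 0 then (lst, s.2 - 2)
      else (lst, s.2 + 2))
    ([], length - 1)
  r.1

-- ===== PORT B =====
def get_index_odd_count_alt (length : Int) : List Int :=
  let start := length - 1
  if PySem.Int.mod start 2 != 0 then
    (PySem.List.pyRange 0 length 1).map (fun i => start + 2 * i)
  else
    let mid := PySem.Int.floordiv start 2
    (PySem.List.pyRange 0 length 1).map
      (fun i => if i ≤ mid then start - 2 * i else 2 * i - length)

-- ===== PRECONDITION & SPEC =====
def Spec_get_index_odd_count (length : Int) (out : List Int) : Prop := out = get_index_odd_count_alt length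
instance (length : Int) (out : List Int) : Decidable (Spec_get_index_odd_count length out) := by unfold Spec_get_index_odd_count; infer_instance

-- ===== CLAIM (what is proved, stated in full; the proofs are below) =====
def Claim_equal_get_index_odd_count : Prop := ∀ (length : Int), Dom_get_index_odd_count length → Spec_get_index_odd_count length (get_index_odd_count length)

-- ===== LEMMAS AND PROOFS =====

-- A's loop body (the state is (accumulated list, x))
def pvStepA (s : List Int × Int) : List Int × Int :=
  let lst := s.1 ++ [s.2]
  if s.2 == 0 then (lst, s.2 + 1)
  else if PySem.Int.mod s.2 2 == 0 then (lst, s.2 - 2)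
  else (lst, s.2 + 2)

-- iterate A's body n times
def pvIterA : Nat → (List Int × Int) → (List Int × Int)
  | 0, s => s
  | n + 1, s => pvIterA n (pvStepA s)

theorem pvFoldl_eq_iterA : ∀ (l : List Int) (s : List Int × Int),
    l.foldl (fun s _ => pvStepA s) s = pvIterA l.length s := by
  intro l
  induction l with
  | nil => intro s; rfl
  | cons a t ih => intro s; simpa [List.foldl, pvIterA] using ih (pvStepA s)

theorem pvIterA_odd : ∀ (n : Nat) (acc : List Int) (x : Int), x % 2 = 1 →
    pvIterA n (acc, x) =
      (acc ++ (List.range n).map (fun (k : Nat) => x + 2 * (k : Int)), x + 2 * n) := by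
  intro n
  induction n with
  | zero => intro acc x _; simp [pvIterA]
  | succ n ih =>
    intro acc x hx
    have hx0 : x ≠ 0 := by omega
    have hmod : PySem.Int.mod x 2 = 1 := by
      rw [PySem.Int.mod_eq_emod_of_pos (by omega : (0:Int) < 2)]; exact hx
    have hstep : pvStepA (acc, x) = (acc ++ [x], x + 2) := by
      simp only [pvStepA, hmod]
      simp [hx0]
    rw [pvIterA, hstep, ih (acc ++ [x]) (x + 2) (by omega)]
    rw [List.range_succ_eq_map]
    simp only [List.map_cons, List.map_map, Prod.mk.injEq, List.append_assoc,
      List.singleton_append, Function.comp, Nat.cast_zero]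
    refine ⟨?_, by push_cast; ring⟩
    have : x + 2 * (0 : Int) = x := by ring
    rw [this]
    congr 2
    apply List.map_congr_left; intro k _
    simp only [Function.comp_apply]
    push_cast; ring

theorem pvIterA_even : ∀ (n : Nat) (acc : List Int) (x : Int), 0 ≤ x → x % 2 = 0 →
    (pvIterA n (acc, x)).1 =
      acc ++ (List.range n).map
        (fun (k : Nat) => if (k : Int) ≤ x / 2 then x - 2 * (k : Int) else 2 * k - x - 1) := by
  intro n
  induction n with
  | zero => intro acc x _ _; simp [pvIterA]
  | succ n ih =>
    intro acc x hx0 hx2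
    by_cases h0 : x = 0
    · subst h0
      have hstep : pvStepA (acc, (0 : Int)) = (acc ++ [0], 1) := by simp [pvStepA]
      rw [pvIterA, hstep, pvIterA_odd n (acc ++ [0]) 1 (by decide)]
      rw [List.range_succ_eq_map]
      simp only [List.map_cons, List.map_map, List.append_assoc, List.singleton_append,
        Nat.cast_zero]
      norm_num
      intro a _
      omega
    · have hmod : PySem.Int.mod x 2 = 0 := by
        rw [PySem.Int.mod_eq_emod_of_pos (by omega : (0:Int) < 2)]; exact hx2
      have hstep : pvStepA (acc, x) = (acc ++ [x], x - 2) := by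
        simp only [pvStepA, hmod]
        simp [h0]
      rw [pvIterA, hstep, ih (acc ++ [x]) (x - 2) (by omega) (by omega)]
      rw [List.range_succ_eq_map]
      simp only [List.map_cons, List.map_map, List.append_assoc, List.singleton_append,
        Nat.cast_zero]
      have hz : ((0 : Int) ≤ x / 2) := by omega
      have hx' : (if (0:Int) ≤ x / 2 then x - 2 * (0:Int) else 2 * (0:Int) - x - 1) = x := by
        simp [hz]
      rw [hx']
      congr 2
      apply List.map_congr_left; intro k _
      simp only [Function.comp_apply]
      have hdiv : (x - 2) / 2 = x / 2 - 1 := by omega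
      push_cast
      split_ifs <;> omega

-- ===== VERDICT (by name: the statement is the Claim_ definition above) =====
theorem get_index_odd_count_spec : Claim_equal_get_index_odd_count := by
  intro length _
  unfold Spec_get_index_odd_count get_index_odd_count get_index_odd_count_alt
  rw [show (fun (s : List Int × Int) (_ : Int) =>
      let lst := s.1 ++ [s.2]
      if s.2 == 0 then (lst, s.2 + 1)
      else if PySem.Int.mod s.2 2 == 0 then (lst, s.2 - 2)
      else (lst, s.2 + 2)) = (fun s _ => pvStepA s) from rfl]
  rw [pvFoldl_eq_iterA, PySem.List.length_pyRange_one]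
  rw [PySem.List.pyRange_one 0 length]
  have hm : PySem.Int.mod (length - 1) 2 = (length - 1) % 2 :=
    PySem.Int.mod_eq_emod_of_pos (by omega : (0:Int) < 2)
  by_cases hodd : (length - 1) % 2 = 1
  · have hb : (PySem.Int.mod (length - 1) 2 != 0) = true := by rw [hm, hodd]; decide
    simp only [hb, if_true]
    rw [pvIterA_odd _ [] (length - 1) hodd]
    simp only [List.nil_append, List.map_map]
    apply List.map_congr_left; intro k _
    simp only [Function.comp_apply]
    ring
  · have heven : (length - 1) % 2 = 0 := by omega
    have hb : (PySem.Int.mod (length - 1) 2 != 0) = false := by rw [hm, heven]; decide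
    simp only [hb, Bool.false_eq_true, if_false]
    by_cases hpos : 0 ≤ length - 1
    · rw [pvIterA_even _ [] (length - 1) hpos heven]
      rw [PySem.Int.floordiv_eq_ediv_of_pos (by omega : (0:Int) < 2)]
      simp only [List.nil_append, List.map_map]
      apply List.map_congr_left; intro k _
      simp only [Function.comp_apply]
      split_ifs <;> omega
    · have hn : (length - 0).toNat = 0 := by omega
      rw [hn]
      simp [pvIterA]
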